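-- pv_equiv track=rewrite | github.com/HenryVarro666/Spherical_U-Net | vtk_npz_three_cla.py | bfs_expand
-- ===== SOURCE A (Python) =====
-- from collections import deque
--
-- def bfs_expand(line_indices, adjacency_list, width_steps):
--     """
--     使用广度优先搜索扩展线的邻域
--
--     参数:
--         line_indices (ndarray): 线的顶点索引
--         adjacency_list (list): 邻接列表
--         width_steps (int): 邻域宽度
--     返回:
--         set: 扩展后的顶点索引集合
--     """
--     visited = set()
--     queue = deque()
--     for idx in line_indices:
--         queue.append((idx, 0))
--         visited.add(idx)
--
--     expanded_points = set(line_indices)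
--
--     while queue:
--         current, depth = queue.popleft()
--         if depth < width_steps:
--             for neighbor in adjacency_list[current]:
--                 if neighbor not in visited:
--                     visited.add(neighbor)
--                     queue.append((neighbor, depth + 1))
--                     expanded_points.add(neighbor)
--
--     return expanded_points
-- ===== SOURCE B (Python) =====
-- def bfs_expand(line_indices, adjacency_list, width_steps):
--     # Level-synchronous BFS: advance a whole frontier one hop per outer iteration,
--     # instead of a depth-tagged deque.
--     visited = set(line_indices)
--     frontier = list(line_indices)
--     for _ in range(width_steps):
--         if not frontier:
--             break
--         nxt = []
--         for node in frontier:
--             for nb in adjacency_list[node]: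
--                 if nb not in visited:
--                     visited.add(nb)
--                     nxt.append(nb)
--         frontier = nxt
--     return visited
-- ===== Notes on version B (the rewrite author's own statement) =====
-- stated objective: alternative
-- what changed: Replaced the depth-tagged deque BFS (a single while-loop popping (node, depth) pairs) by a level-synchronous BFS that advances a whole frontier list one hop per outer iteration, width_steps times, with no per-node depth bookkeeping.
-- outside the precondition, e.g. on bfs_expand([0], [[1], [7]], 2): A returns {0, 1, 7}, B returns {0, 1, 7}; on bfs_expand([5], [[0]], 1): A raises IndexError, B raises IndexError
import Mathlib
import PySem

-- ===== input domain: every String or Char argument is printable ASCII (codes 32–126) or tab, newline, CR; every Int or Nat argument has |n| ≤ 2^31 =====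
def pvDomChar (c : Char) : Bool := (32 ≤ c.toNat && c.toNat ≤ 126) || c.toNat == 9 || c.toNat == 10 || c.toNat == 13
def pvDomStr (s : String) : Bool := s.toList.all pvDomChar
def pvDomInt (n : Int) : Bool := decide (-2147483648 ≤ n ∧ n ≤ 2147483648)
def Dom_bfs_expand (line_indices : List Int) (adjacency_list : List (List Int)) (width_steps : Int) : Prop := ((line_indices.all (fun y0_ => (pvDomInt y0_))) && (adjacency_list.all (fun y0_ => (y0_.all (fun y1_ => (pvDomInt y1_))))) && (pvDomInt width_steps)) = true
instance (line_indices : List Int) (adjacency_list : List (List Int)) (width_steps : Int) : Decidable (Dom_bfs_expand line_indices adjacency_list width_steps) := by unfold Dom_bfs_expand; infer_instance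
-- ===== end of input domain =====

-- B replaces A's depth-tagged deque BFS by a level-synchronous frontier BFS (one hop of the
-- whole frontier per outer iteration); same result set, an alternative decomposition.

-- ===== PORT A =====
-- The while-loop over the deque is fuel recursion; the fuel |line_indices| + |flatten adj|
-- provably bounds the number of pops (see the unseen-count lemmas below), so the port is exact.
-- adjacency_list[current] is PySem.List.pyGet?; Python raises IndexError where it is none, so
-- Pre_ excludes those inputs and the .getD [] branch is never reached under Pre_.
def bfsStepA (depth : Int) (st : PySem.Set Int × List (Int × Int) × PySem.Set Int)
    (neighbor : Int) : PySem.Set Int × List (Int × Int) × PySem.Set Int :=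
  if st.1.contains neighbor then st
  else (PySem.Set.add st.1 neighbor, st.2.1 ++ [(neighbor, depth + 1)], PySem.Set.add st.2.2 neighbor)

def bfsLoopA (adjacency_list : List (List Int)) (width_steps : Int) :
    Nat → List (Int × Int) → PySem.Set Int → PySem.Set Int → PySem.Set Int
  | 0, _, _, expanded => expanded
  | _ + 1, [], _, expanded => expanded
  | fuel + 1, (current, depth) :: rest, visited, expanded =>
    if depth < width_steps then
      let st := ((PySem.List.pyGet? adjacency_list current).getD []).foldl (bfsStepA depth)
        (visited, rest, expanded)
      bfsLoopA adjacency_list width_steps fuel st.2.1 st.1 st.2.2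
    else
      bfsLoopA adjacency_list width_steps fuel rest visited expanded

def bfs_expand (line_indices : List Int) (adjacency_list : List (List Int)) (width_steps : Int) : List Int :=
  let visited : PySem.Set Int := line_indices.foldl PySem.Set.add PySem.Set.empty
  let queue : List (Int × Int) := line_indices.map (fun idx => (idx, (0 : Int)))
  let expanded : PySem.Set Int := PySem.Set.ofList line_indices
  bfsLoopA adjacency_list width_steps (line_indices.length + adjacency_list.flatten.length)
    queue visited expanded

-- ===== PORT B =====
def bfsStepB (acc : PySem.Set Int × List Int) (nb : Int) : PySem.Set Int × List Int :=
  if acc.1.contains nb then acc else (PySem.Set.add acc.1 nb, acc.2 ++ [nb])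

def bfsLevel (adjacency_list : List (List Int)) (frontier : List Int)
    (acc : PySem.Set Int × List Int) : PySem.Set Int × List Int :=
  frontier.foldl (fun acc node => ((PySem.List.pyGet? adjacency_list node).getD []).foldl bfsStepB acc) acc

def bfsLoopB (adjacency_list : List (List Int)) : Nat → PySem.Set Int → List Int → PySem.Set Int
  | 0, visited, _ => visited
  | k + 1, visited, frontier =>
    if frontier.isEmpty then visited
    else
      let st := bfsLevel adjacency_list frontier (visited, [])
      bfsLoopB adjacency_list k st.1 st.2

def bfs_expand_alt (line_indices : List Int) (adjacency_list : List (List Int)) (width_steps : Int) : List Int :=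
  bfsLoopB adjacency_list width_steps.toNat (PySem.Set.ofList line_indices) line_indices

-- ===== PRECONDITION & SPEC =====
-- Pre_ excludes inputs where an indexed vertex may be out of Python's index range: with
-- width_steps > 0 the line vertices are indexed, and with width_steps > 1 neighbors are too,
-- so there Python A may raise IndexError; whether a bad index is actually reached is
-- reachability-dependent, so the closed form also excludes some inputs where A still returns
-- (the bad index is never expanded) — see the claim's cites.
def Pre_bfs_expand (line_indices : List Int) (adjacency_list : List (List Int)) (width_steps : Int) : Prop :=
  width_steps ≤ 0 ∨
    ((∀ i ∈ line_indices, PySem.Raise.InRange adjacency_list.length i) ∧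
     (1 < width_steps → ∀ row ∈ adjacency_list, ∀ i ∈ row, PySem.Raise.InRange adjacency_list.length i))
instance (line_indices : List Int) (adjacency_list : List (List Int)) (width_steps : Int) : Decidable (Pre_bfs_expand line_indices adjacency_list width_steps) := by unfold Pre_bfs_expand; infer_instance

def pvWitness_bfs_expand : List Int × List (List Int) × Int := ([0], [[1], [0]], 1)

def Spec_bfs_expand (line_indices : List Int) (adjacency_list : List (List Int)) (width_steps : Int) (out : List Int) : Prop := out = bfs_expand_alt line_indices adjacency_list width_steps
instance (line_indices : List Int) (adjacency_list : List (List Int)) (width_steps : Int) (out : List Int) : Decidable (Spec_bfs_expand line_indices adjacency_list width_steps out) := by unfold Spec_bfs_expand; infer_instance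

-- ===== CLAIM (what is proved, stated in full; the proofs are below) =====
def Claim_equal_bfs_expand : Prop := ∀ (line_indices : List Int) (adjacency_list : List (List Int)) (width_steps : Int), Dom_bfs_expand line_indices adjacency_list width_steps → Pre_bfs_expand line_indices adjacency_list width_steps → Spec_bfs_expand line_indices adjacency_list width_steps (bfs_expand line_indices adjacency_list width_steps)

-- ===== LEMMAS AND PROOFS =====

-- number of vertices of the graph's edge lists not yet visited: the termination measure
def pvUnseen (adjacency_list : List (List Int)) (S : PySem.Set Int) : Nat :=
  (adjacency_list.flatten.toFinset.filter (fun x => x ∉ S)).card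

lemma pv_stepB_mem {acc : PySem.Set Int × List Int} {nb : Int} (h : nb ∈ acc.1) :
    bfsStepB acc nb = acc := by
  simp [bfsStepB, h]

lemma pv_stepB_not_mem {acc : PySem.Set Int × List Int} {nb : Int} (h : nb ∉ acc.1) :
    bfsStepB acc nb = (PySem.Set.add acc.1 nb, acc.2 ++ [nb]) := by
  simp [bfsStepB, h]

lemma pv_stepA_mem (d : Int) {S E : PySem.Set Int} {rest : List (Int × Int)} {nb : Int}
    (h : nb ∈ S) : bfsStepA d (S, rest, E) nb = (S, rest, E) := by
  simp [bfsStepA, h]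

lemma pv_stepA_not_mem (d : Int) {S E : PySem.Set Int} {rest : List (Int × Int)} {nb : Int}
    (h : nb ∉ S) :
    bfsStepA d (S, rest, E) nb =
      (PySem.Set.add S nb, rest ++ [(nb, d + 1)], PySem.Set.add E nb) := by
  simp [bfsStepA, h]

lemma pv_nbrs_subset (adjacency_list : List (List Int)) (c x : Int)
    (hx : x ∈ (PySem.List.pyGet? adjacency_list c).getD []) : x ∈ adjacency_list.flatten := by
  cases h : PySem.List.pyGet? adjacency_list c with
  | none => rw [h] at hx; simp at hx
  | some row =>
    rw [h] at hx
    exact List.mem_flatten.2 ⟨row, PySem.List.mem_of_pyGet?_eq_some _ h, hx⟩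

lemma pv_loopA_nil (adjacency_list : List (List Int)) (width_steps : Int)
    (fuel : Nat) (v e : PySem.Set Int) :
    bfsLoopA adjacency_list width_steps fuel [] v e = e := by
  cases fuel <;> rfl

lemma pv_stepB_append (nbrs : List Int) :
    ∀ (acc : PySem.Set Int × List Int),
      nbrs.foldl bfsStepB acc =
        ((nbrs.foldl bfsStepB (acc.1, [])).1, acc.2 ++ (nbrs.foldl bfsStepB (acc.1, [])).2) := by
  induction nbrs with
  | nil => intro acc; simp
  | cons nb rest ih =>
    intro acc
    by_cases h : nb ∈ acc.1
    · rw [List.foldl_cons, List.foldl_cons, pv_stepB_mem h, pv_stepB_mem (acc := (acc.1, ([] : List Int))) h]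
      exact ih acc
    · rw [List.foldl_cons, List.foldl_cons, pv_stepB_not_mem h, pv_stepB_not_mem (acc := (acc.1, ([] : List Int))) h,
        ih (PySem.Set.add acc.1 nb, acc.2 ++ [nb])]
      have h2 := ih (PySem.Set.add ((acc.1, ([] : List Int)).1) nb, (acc.1, ([] : List Int)).2 ++ [nb])
      simp only [List.nil_append] at h2 ⊢
      rw [h2]
      simp

lemma pv_level_append (adjacency_list : List (List Int)) (frontier : List Int) :
    ∀ (acc : PySem.Set Int × List Int),
      bfsLevel adjacency_list frontier acc =
        ((bfsLevel adjacency_list frontier (acc.1, [])).1,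
         acc.2 ++ (bfsLevel adjacency_list frontier (acc.1, [])).2) := by
  induction frontier with
  | nil => intro acc; simp [bfsLevel]
  | cons c rest ih =>
    intro acc
    simp only [bfsLevel, List.foldl_cons]
    rw [pv_stepB_append _ acc, pv_stepB_append _ ((acc.1, ([] : List Int)))]
    simp only [List.nil_append, Prod.mk.eta]
    have h1 := ih ((((PySem.List.pyGet? adjacency_list c).getD []).foldl bfsStepB (acc.1, [])).1,
          acc.2 ++ (((PySem.List.pyGet? adjacency_list c).getD []).foldl bfsStepB (acc.1, [])).2)
    have h2 := ih (((PySem.List.pyGet? adjacency_list c).getD []).foldl bfsStepB (acc.1, []))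
    simp only [bfsLevel] at h1 h2
    rw [h1, h2]
    simp

lemma pv_foldA_eq_foldB (nbrs : List Int) (d : Int) :
    ∀ (S : PySem.Set Int) (rest : List (Int × Int)),
      nbrs.foldl (bfsStepA d) (S, rest, S) =
        ((nbrs.foldl bfsStepB (S, [])).1,
         rest ++ (nbrs.foldl bfsStepB (S, [])).2.map (fun x => (x, d + 1)),
         (nbrs.foldl bfsStepB (S, [])).1) := by
  induction nbrs with
  | nil => intro S rest; simp
  | cons nb tail ih =>
    intro S rest
    by_cases h : nb ∈ S
    · rw [List.foldl_cons, List.foldl_cons, pv_stepA_mem d h, pv_stepB_mem (acc := (S, [])) h]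
      exact ih S rest
    · rw [List.foldl_cons, List.foldl_cons, pv_stepA_not_mem d h,
        pv_stepB_not_mem (acc := (S, [])) h]
      simp only [List.nil_append]
      rw [ih (PySem.Set.add S nb) (rest ++ [(nb, d + 1)]),
        pv_stepB_append tail (PySem.Set.add S nb, [nb])]
      simp

lemma pv_unseen_add (adjacency_list : List (List Int)) (S : PySem.Set Int) (nb : Int)
    (hmem : nb ∈ adjacency_list.flatten) (hnot : nb ∉ S) :
    pvUnseen adjacency_list (PySem.Set.add S nb) + 1 = pvUnseen adjacency_list S := by
  have hfil : adjacency_list.flatten.toFinset.filter (fun x => x ∉ PySem.Set.add S nb) =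
      (adjacency_list.flatten.toFinset.filter (fun x => x ∉ S)).erase nb := by
    ext x
    simp only [Finset.mem_filter, Finset.mem_erase, PySem.Set.mem_add]
    tauto
  have hin : nb ∈ adjacency_list.flatten.toFinset.filter (fun x => x ∉ S) := by
    simp [hmem, hnot]
  have hpos : 0 < (adjacency_list.flatten.toFinset.filter (fun x => x ∉ S)).card :=
    Finset.card_pos.2 ⟨nb, hin⟩
  unfold pvUnseen
  rw [hfil, Finset.card_erase_of_mem hin]
  omega

lemma pv_unseen_foldB (adjacency_list : List (List Int)) (nbrs : List Int) :
    ∀ (S : PySem.Set Int), (∀ x ∈ nbrs, x ∈ adjacency_list.flatten) →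
      pvUnseen adjacency_list (nbrs.foldl bfsStepB (S, [])).1
        + (nbrs.foldl bfsStepB (S, [])).2.length = pvUnseen adjacency_list S := by
  induction nbrs with
  | nil => intro S _; simp
  | cons nb rest ih =>
    intro S hsub
    by_cases h : nb ∈ S
    · rw [List.foldl_cons, pv_stepB_mem (acc := (S, [])) h]
      exact ih S (fun x hx => hsub x (List.mem_cons_of_mem _ hx))
    · rw [List.foldl_cons, pv_stepB_not_mem (acc := (S, [])) h]
      simp only [List.nil_append]
      rw [pv_stepB_append rest (PySem.Set.add S nb, [nb])]
      have hih := ih (PySem.Set.add S nb) (fun x hx => hsub x (List.mem_cons_of_mem _ hx))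
      have hadd := pv_unseen_add adjacency_list S nb (hsub nb (List.mem_cons_self)) h
      simp only [List.length_append, List.length_cons, List.length_nil]
      omega

lemma pv_unseen_level (adjacency_list : List (List Int)) (frontier : List Int) :
    ∀ (S : PySem.Set Int),
      pvUnseen adjacency_list (bfsLevel adjacency_list frontier (S, [])).1
        + (bfsLevel adjacency_list frontier (S, [])).2.length = pvUnseen adjacency_list S := by
  induction frontier with
  | nil => intro S; simp [bfsLevel]
  | cons c rest ih =>
    intro S
    simp only [bfsLevel, List.foldl_cons]
    have hA := pv_level_append adjacency_list rest
      (((PySem.List.pyGet? adjacency_list c).getD []).foldl bfsStepB (S, []))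
    simp only [bfsLevel] at hA
    rw [hA]
    have h1 := pv_unseen_foldB adjacency_list ((PySem.List.pyGet? adjacency_list c).getD []) S
      (fun x hx => pv_nbrs_subset adjacency_list c x hx)
    have h2 := ih (((PySem.List.pyGet? adjacency_list c).getD []).foldl bfsStepB (S, [])).1
    simp only [bfsLevel] at h2
    simp only [List.length_append]
    omega

lemma pv_drain (adjacency_list : List (List Int)) (width_steps : Int) (d : Int)
    (hd : ¬ d < width_steps) (frontier : List Int) :
    ∀ (fuel : Nat) (S E : PySem.Set Int),
      bfsLoopA adjacency_list width_steps (frontier.length + fuel)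
        (frontier.map (fun x => (x, d))) S E = E := by
  induction frontier with
  | nil => intro fuel S E; simpa using pv_loopA_nil adjacency_list width_steps fuel S E
  | cons c rest ih =>
    intro fuel S E
    have hlen : (c :: rest).length + fuel = (rest.length + fuel) + 1 := by
      simp [Nat.add_right_comm]
    rw [hlen, List.map_cons]
    simp only [bfsLoopA, hd, if_false]
    exact ih fuel S E

lemma pv_level_A (adjacency_list : List (List Int)) (width_steps : Int) (d : Int)
    (hd : d < width_steps) (frontier : List Int) :
    ∀ (pending : List Int) (S : PySem.Set Int) (fuel : Nat),
      bfsLoopA adjacency_list width_steps (frontier.length + fuel)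
        (frontier.map (fun x => (x, d)) ++ pending.map (fun x => (x, d + 1))) S S =
      bfsLoopA adjacency_list width_steps fuel
        ((pending ++ (bfsLevel adjacency_list frontier (S, [])).2).map (fun x => (x, d + 1)))
        (bfsLevel adjacency_list frontier (S, [])).1
        (bfsLevel adjacency_list frontier (S, [])).1 := by
  induction frontier with
  | nil => intro pending S fuel; simp [bfsLevel]
  | cons c rest ih =>
    intro pending S fuel
    have hlen : (c :: rest).length + fuel = (rest.length + fuel) + 1 := by
      simp [Nat.add_right_comm]
    rw [hlen, List.map_cons, List.cons_append]
    simp only [bfsLoopA, hd, if_true]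
    rw [pv_foldA_eq_foldB _ d S _]
    have hq : (rest.map (fun x => (x, d)) ++ pending.map (fun x => (x, d + 1)))
        ++ (((PySem.List.pyGet? adjacency_list c).getD []).foldl bfsStepB (S, [])).2.map
            (fun x => (x, d + 1)) =
        rest.map (fun x => (x, d)) ++
          (pending ++ (((PySem.List.pyGet? adjacency_list c).getD []).foldl bfsStepB (S, [])).2).map
            (fun x => (x, d + 1)) := by
      simp
    simp only [hq]
    rw [ih (pending ++ (((PySem.List.pyGet? adjacency_list c).getD []).foldl bfsStepB (S, [])).2)
      (((PySem.List.pyGet? adjacency_list c).getD []).foldl bfsStepB (S, [])).1 fuel]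
    have hlvl : bfsLevel adjacency_list (c :: rest) (S, []) =
        ((bfsLevel adjacency_list rest
            ((((PySem.List.pyGet? adjacency_list c).getD []).foldl bfsStepB (S, [])).1, [])).1,
         (((PySem.List.pyGet? adjacency_list c).getD []).foldl bfsStepB (S, [])).2 ++
          (bfsLevel adjacency_list rest
            ((((PySem.List.pyGet? adjacency_list c).getD []).foldl bfsStepB (S, [])).1, [])).2) := by
      simp only [bfsLevel, List.foldl_cons]
      exact pv_level_append adjacency_list rest _
    rw [hlvl]
    simp

lemma pv_main (adjacency_list : List (List Int)) (width_steps : Int) :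
    ∀ (k : Nat) (d : Int) (frontier : List Int) (S : PySem.Set Int) (fuel : Nat),
      (width_steps - d).toNat = k →
      pvUnseen adjacency_list S + frontier.length ≤ fuel →
      bfsLoopA adjacency_list width_steps fuel (frontier.map (fun x => (x, d))) S S =
        bfsLoopB adjacency_list k S frontier := by
  intro k
  induction k with
  | zero =>
    intro d frontier S fuel hk hfuel
    have hd : ¬ d < width_steps := by omega
    obtain ⟨m, rfl⟩ : ∃ m, fuel = frontier.length + m :=
      ⟨fuel - frontier.length, by omega⟩
    rw [pv_drain adjacency_list width_steps d hd frontier m S S]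
    rfl
  | succ k ih =>
    intro d frontier S fuel hk hfuel
    have hd : d < width_steps := by omega
    cases frontier with
    | nil =>
      rw [List.map_nil, pv_loopA_nil]
      rfl
    | cons c rest =>
      obtain ⟨m, rfl⟩ : ∃ m, fuel = (c :: rest).length + m :=
        ⟨fuel - (c :: rest).length, by omega⟩
      have hlvl := pv_level_A adjacency_list width_steps d hd (c :: rest) [] S m
      simp only [List.map_nil, List.nil_append, List.append_nil] at hlvl
      rw [hlvl]
      have hu := pv_unseen_level adjacency_list (c :: rest) S
      rw [ih (d + 1) (bfsLevel adjacency_list (c :: rest) (S, [])).2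
        (bfsLevel adjacency_list (c :: rest) (S, [])).1 m (by omega) (by omega)]
      simp [bfsLoopB]

-- ===== VERDICT (by name: the statement is the Claim_ definition above) =====
theorem bfs_expand_spec : Claim_equal_bfs_expand := by
  intro line_indices adjacency_list width_steps _ _
  unfold Spec_bfs_expand bfs_expand bfs_expand_alt
  have hof : line_indices.foldl PySem.Set.add PySem.Set.empty = PySem.Set.ofList line_indices := rfl
  rw [hof]
  apply pv_main adjacency_list width_steps width_steps.toNat 0 line_indices
    (PySem.Set.ofList line_indices)
  · simp
  · have h1 : pvUnseen adjacency_list (PySem.Set.ofList line_indices) ≤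
        adjacency_list.flatten.length := by
      calc pvUnseen adjacency_list (PySem.Set.ofList line_indices)
          ≤ adjacency_list.flatten.toFinset.card := Finset.card_filter_le _ _
        _ ≤ adjacency_list.flatten.length := adjacency_list.flatten.toFinset_card_le
    omega
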